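-- pv_equiv track=rewrite | github.com/jungwoo3490/Algorithm | Programmers/Level 1/크기가 작은 부분 문자열.py | solution
-- ===== SOURCE A (Python) =====
-- def solution(t, p):
--     count = 0
--     flag = 0
--     for i in range(len(t) - (len(p) - 1)):
--         for j in range(len(p)):
--             if t[i + j] < p[j]:
--                 flag = 1
--                 break
--             if t[i + j] > p[j]:
--                 break
--             if j == len(p) - 1 and t[i + j] == p[j]:
--                 flag = 1
--                 break
--         if flag == 1:
--             count += 1
--         flag = 0
--     return count
-- ===== SOURCE B (Python) =====
-- def solution(t, p):
--     m = len(p)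
--     return sum(1 for i in range(len(t) - m + 1) if t[i:i+m] <= p)
-- ===== Notes on version B (the rewrite author's own statement) =====
-- stated objective: idiomatic
-- what changed: Replaced the hand-written nested character loop with break/flag bookkeeping by a one-line count of windows using Python's built-in lexicographic slice comparison t[i:i+m] <= p (same asymptotics, the per-window compare runs in C).
-- outside the precondition, e.g. on solution('ab', ''): A returns 0, B returns 3
import Mathlib
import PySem

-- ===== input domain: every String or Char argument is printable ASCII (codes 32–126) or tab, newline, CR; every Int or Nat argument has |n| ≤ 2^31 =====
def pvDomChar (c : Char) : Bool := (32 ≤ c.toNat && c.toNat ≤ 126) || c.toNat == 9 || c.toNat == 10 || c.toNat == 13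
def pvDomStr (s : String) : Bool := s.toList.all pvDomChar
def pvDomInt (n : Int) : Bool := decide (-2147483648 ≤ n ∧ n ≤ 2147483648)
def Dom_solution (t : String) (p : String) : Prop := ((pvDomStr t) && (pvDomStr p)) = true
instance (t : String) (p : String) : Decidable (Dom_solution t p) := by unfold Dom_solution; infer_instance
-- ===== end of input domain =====

-- B replaces A's nested character loop (flag/break bookkeeping) by counting windows with a
-- built-in lexicographic slice comparison; equivalence is proved for nonempty p.

-- ===== PORT A =====
-- inner 'for j in range(len(p))' loop of A: returns the flag (1 or 0) it leaves behind.
-- Indices i+j are always in range when this is reached from the outer loop, so getD is exact.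
def solutionInner (t p : List Char) (i : Nat) (j : Nat) : Int :=
  if _h : j < p.length then
    let tc := t.getD (i + j) ' '
    let pc := p.getD j ' '
    if tc < pc then 1                                   -- flag = 1; break
    else if pc < tc then 0                              -- break (flag stays 0)
    else if j = p.length - 1 ∧ tc = pc then 1           -- flag = 1; break
    else solutionInner t p i (j + 1)
  else 0
termination_by p.length - j

def solution (t : String) (p : String) : Int :=
  let tl := t.toList
  let pl := p.toList
  (PySem.List.pyRange 0 ((tl.length : Int) - ((pl.length : Int) - 1)) 1).foldl
    (fun count i => if solutionInner tl pl i.toNat 0 = 1 then count + 1 else count) 0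

-- ===== PORT B =====
def solution_alt (t : String) (p : String) : Int :=
  let tl := t.toList
  let pl := p.toList
  let m : Int := pl.length
  ((PySem.List.pyRange 0 ((tl.length : Int) - m + 1) 1).filter
    (fun i => decide (PySem.List.slice tl (some i) (some (i + m)) ≤ pl))).length

-- ===== PRECONDITION & SPEC =====
-- Pre_ excludes the empty pattern p = "", a defensible corner where A's 0 (its inner loop never
-- sets the flag) and B's len(t)+1 (every empty window compares ≤ "") are both accidental choices.
def Pre_solution (t : String) (p : String) : Prop := p ≠ ""
instance (t : String) (p : String) : Decidable (Pre_solution t p) := by unfold Pre_solution; infer_instance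
def pvWitness_solution : String × String := ("baabc", "ab")

def Spec_solution (t : String) (p : String) (out : Int) : Prop := out = solution_alt t p
instance (t : String) (p : String) (out : Int) : Decidable (Spec_solution t p out) := by unfold Spec_solution; infer_instance

-- ===== CLAIM (what is proved, stated in full; the proofs are below) =====
def Claim_equal_solution : Prop := ∀ (t : String) (p : String), Dom_solution t p → Pre_solution t p → Spec_solution t p (solution t p)

-- ===== LEMMAS AND PROOFS =====

-- counting fold = length of the filtered list
lemma foldl_count_filter {α : Type} (q : α → Prop) [DecidablePred q] (l : List α) (c : Int) :
    l.foldl (fun c x => if q x then c + 1 else c) c = c + (l.filter (fun x => decide (q x))).length := by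
  induction l generalizing c with
  | nil => simp
  | cons x xs ih =>
      by_cases h : q x
      · simp only [List.foldl_cons, if_pos h, ih, List.filter_cons, decide_eq_true h,
          if_pos, List.length_cons]
        push_cast; ring
      · simp [List.foldl_cons, h, ih]

-- head/tail characterisation of Mathlib's lexicographic ≤ on List Char
lemma cons_le_cons_char (a b : Char) (l l' : List Char) :
    (a :: l ≤ b :: l') ↔ (a < b ∨ a = b ∧ l ≤ l') := by
  rw [le_iff_lt_or_eq, le_iff_lt_or_eq]
  have h1 : ((a :: l) < (b :: l')) ↔ List.Lex (·<·) (a :: l) (b :: l') := Iff.rfl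
  have h2 : (l < l') ↔ List.Lex (·<·) l l' := Iff.rfl
  rw [h1, h2, List.cons_lex_cons_iff]
  constructor
  · rintro (⟨h|⟨rfl,h⟩⟩|h)
    · exact Or.inl h
    · exact Or.inr ⟨rfl, Or.inl h⟩
    · injection h with h1 h2; exact Or.inr ⟨h1, Or.inr h2⟩
  · rintro (h|⟨rfl, h|rfl⟩)
    · exact Or.inl (Or.inl h)
    · exact Or.inl (Or.inr ⟨rfl, h⟩)
    · exact Or.inr rfl

-- the inner loop decides lexicographic ≤ of the window suffix against p's suffix
lemma solutionInner_eq_le (t p : List Char) (i : Nat) :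
    ∀ j, j < p.length → i + p.length ≤ t.length →
      (solutionInner t p i j = 1 ↔ ((t.drop i).take p.length).drop j ≤ p.drop j) := by
  intro j
  induction hk : p.length - j using Nat.strong_induction_on generalizing j with
  | _ k ih =>
    intro hj hlen
    subst hk
    have hidx : i + j < t.length := by omega
    have hlen' : j < ((t.drop i).take p.length).length := by
      simp [List.length_take, List.length_drop]; omega
    have hwin : (((t.drop i).take p.length).drop j) = t.getD (i+j) ' ' :: ((t.drop i).take p.length).drop (j+1) := by
      rw [List.drop_eq_getElem_cons hlen']
      congr 1
      rw [List.getElem_take, List.getElem_drop, List.getD_eq_getElem t ' ' hidx]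
    have hp : p.drop j = p.getD j ' ' :: p.drop (j+1) := by
      rw [List.drop_eq_getElem_cons hj]
      rw [List.getD_eq_getElem p ' ' hj]
    rw [solutionInner]
    simp only [hj, dif_pos]
    set tc := t.getD (i+j) ' ' with htc
    set pc := p.getD j ' ' with hpc
    rw [hwin, hp, cons_le_cons_char]
    by_cases h1 : tc < pc
    · simp [h1]
    · by_cases h2 : pc < tc
      · have hne : tc ≠ pc := h2.ne'
        have hnle : ¬ (tc < pc ∨ tc = pc ∧ ((t.drop i).take p.length).drop (j+1) ≤ p.drop (j+1)) := by
          rintro (h|⟨h,_⟩)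
          · exact h1 h
          · exact hne h
        simp only [if_neg h1, if_pos h2, hnle, iff_false]
        norm_num
      · have heq : tc = pc := le_antisymm (not_lt.mp h2) (not_lt.mp h1)
        by_cases h3 : j = p.length - 1
        · have hpd : p.drop (j+1) = [] := by
            apply List.drop_eq_nil_of_le; omega
          have hwd : ((t.drop i).take p.length).drop (j+1) = [] := by
            apply List.drop_eq_nil_of_le
            simp [List.length_take, List.length_drop]; omega
          rw [if_neg h1, if_neg h2, if_pos ⟨h3, heq⟩, hwd, hpd]
          simp [heq]
        · have hj1 : j + 1 < p.length := by omega
          have hrec := ih (p.length - (j+1)) (by omega) (j+1) rfl hj1 hlen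
          rw [if_neg h1, if_neg h2, if_neg (by simp [h3]), hrec]
          simp [heq]

-- window via slice for i in the outer range
lemma slice_window (tl : List Char) (m : Int) (i : Int) (h0 : 0 ≤ i) (hm : 0 ≤ m) :
    PySem.List.slice tl (some i) (some (i + m)) = (tl.drop i.toNat).take m.toNat := by
  rw [PySem.List.slice_toNat tl h0 (by omega)]
  congr 1
  omega

-- ===== VERDICT (by name: the statement is the Claim_ definition above) =====
theorem solution_spec : Claim_equal_solution := by
  intro t p _hdom hpre
  unfold Spec_solution solution solution_alt
  simp only []
  set tl := t.toList with htl
  set pl := p.toList with hpl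
  have hplne : pl ≠ [] := fun h => hpre (String.toList_eq_nil_iff.mp h)
  have hm : 0 < pl.length := List.length_pos_iff.mpr hplne
  have hrange : (tl.length : Int) - ((pl.length : Int) - 1) = (tl.length : Int) - (pl.length : Int) + 1 := by ring
  rw [hrange, foldl_count_filter, zero_add]
  congr 1
  congr 1
  apply List.filter_congr
  intro i hi
  simp only [decide_eq_decide]
  have hmem := PySem.List.mem_pyRange_one.mp hi
  have h0 : 0 ≤ i := hmem.1
  have hub : i ≤ (tl.length : Int) - pl.length := by omega
  have hlen : i.toNat + pl.length ≤ tl.length := by omega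
  have hinner := solutionInner_eq_le tl pl i.toNat 0 hm hlen
  simp only [List.drop_zero] at hinner
  have hslice : PySem.List.slice tl (some i) (some (i + (pl.length : Int))) =
      (tl.drop i.toNat).take pl.length := by
    rw [slice_window tl _ i h0 (by positivity)]
    norm_num
  simp only [hslice]
  by_cases h : solutionInner tl pl i.toNat 0 = 1
  · simp [h, hinner.mp h]
  · have hn : ¬ ((tl.drop i.toNat).take pl.length ≤ pl) := fun hc => h (hinner.mpr hc)
    simp [h, hn]
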